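-- pv_equiv track=rewrite | github.com/AdamZhouSE/pythonHomework | Code/CodeRecords/2465/60708/302131.py | find
-- ===== SOURCE A (Python) =====
-- def find(list):
--     for i in list:
--         sum=0
--         for j in list:
--             if j>=i:
--                 sum=sum+1
--         if sum<=i:
--             return sum
-- ===== SOURCE B (Python) =====
-- def find(list):
--     a = sorted(list)
--     n = len(a)
--     for i in list:
--         lo, hi = 0, n
--         while lo < hi:
--             mid = (lo + hi) // 2
--             if a[mid] < i:
--                 lo = mid + 1
--             else:
--                 hi = mid
--         cnt = n - lo
--         if cnt <= i:
--             return cnt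
-- ===== Notes on version B (the rewrite author's own statement) =====
-- stated objective: faster
-- what changed: B sorts the list once and computes each element's count of values >= i by a hand-written binary search on the sorted list, replacing A's inner linear scan per element.
import Mathlib
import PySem

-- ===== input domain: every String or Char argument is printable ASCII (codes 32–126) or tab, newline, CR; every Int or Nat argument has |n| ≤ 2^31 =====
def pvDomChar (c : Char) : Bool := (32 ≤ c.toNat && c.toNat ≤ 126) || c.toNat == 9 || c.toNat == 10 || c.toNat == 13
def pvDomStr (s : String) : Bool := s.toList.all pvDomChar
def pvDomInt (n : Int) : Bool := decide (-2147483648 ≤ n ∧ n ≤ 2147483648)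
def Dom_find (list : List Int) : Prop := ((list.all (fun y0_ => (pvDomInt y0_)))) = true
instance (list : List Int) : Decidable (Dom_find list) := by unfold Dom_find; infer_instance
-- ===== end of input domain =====

-- ===== PORT A =====
-- B replaces A's inner linear count per element by one sort plus a hand-written binary search (faster).
-- inner loop of A: sum=0; for j in list: if j>=i: sum=sum+1
def countGe (list : List Int) (i : Int) : Int :=
  list.foldl (fun s j => if j ≥ i then s + 1 else s) 0

-- outer loop of A: for i in list, first i with countGe list i ≤ i returns that count
def findAux (orig : List Int) : List Int → Option Int
  | [] => none
  | i :: rest =>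
    let s := countGe orig i
    if s ≤ i then some s else findAux orig rest

def find (list : List Int) : Option Int := findAux list list

-- ===== PORT B =====
-- hand-written bisect_left loop of Source B: while lo < hi: mid=(lo+hi)//2; if a[mid]<x: lo=mid+1 else hi=mid
-- (a[mid] ported as getD 0: Source B only calls it with hi ≤ len(a), so the index is always in range;
--  the fuel argument is a pure totality device: hi - lo bounds the loop's iteration count)
def blF (a : List Int) (x : Int) : Nat → Nat → Nat → Nat
  | 0, lo, _ => lo
  | fuel + 1, lo, hi =>
    if lo < hi then
      let mid := (lo + hi) / 2
      if a.getD mid 0 < x then blF a x fuel (mid + 1) hi else blF a x fuel lo mid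
    else lo

def bl (a : List Int) (x : Int) (lo hi : Nat) : Nat := blF a x (hi - lo) lo hi

-- the for-loop of Source B over the original list
def findAltAux (a : List Int) (n : Nat) : List Int → Option Int
  | [] => none
  | i :: rest =>
    let lo := bl a i 0 n
    let cnt : Int := (n : Int) - (lo : Int)
    if cnt ≤ i then some cnt else findAltAux a n rest

def find_alt (list : List Int) : Option Int :=
  let a := PySem.List.sorted list (fun x => x)
  let n := a.length
  findAltAux a n list

-- ===== PRECONDITION & SPEC =====
def Spec_find (list : List Int) (out : Option Int) : Prop := out = find_alt list
instance (list : List Int) (out : Option Int) : Decidable (Spec_find list out) := by unfold Spec_find; infer_instance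

-- ===== CLAIM (what is proved, stated in full; the proofs are below) =====
def Claim_equal_find : Prop := ∀ (list : List Int), Dom_find list → Spec_find list (find list)

-- ===== LEMMAS AND PROOFS =====

-- the binary search keeps the invariant "everything left of lo is < x, everything from hi on is ≥ x"
lemma blF_inv (a : List Int) (x : Int)
    (hs : ∀ p q : Nat, ∀ _ : p < q, ∀ hq : q < a.length, a[p]'(by omega) ≤ a[q]) :
    ∀ fuel lo hi, hi - lo ≤ fuel → lo ≤ hi → hi ≤ a.length →
    (∀ k (hk : k < a.length), k < lo → a[k] < x) →
    (∀ k (hk : k < a.length), hi ≤ k → x ≤ a[k]) →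
    (blF a x fuel lo hi ≤ a.length ∧
     (∀ k (hk : k < a.length), k < blF a x fuel lo hi → a[k] < x) ∧
     (∀ k (hk : k < a.length), blF a x fuel lo hi ≤ k → x ≤ a[k])) := by
  intro fuel
  induction fuel with
  | zero =>
    intro lo hi hf hle hhi hL hR
    simp only [blF]
    exact ⟨by omega, fun k hk hklt => hL k hk (by omega), fun k hk hge => hR k hk (by omega)⟩
  | succ fuel ih =>
    intro lo hi hf hle hhi hL hR
    simp only [blF]
    by_cases h : lo < hi
    · simp only [h, if_pos]
      have hmid : (lo + hi) / 2 < a.length := by omega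
      have hget : a.getD ((lo + hi) / 2) 0 = a[(lo + hi) / 2] := List.getD_eq_getElem a 0 hmid
      by_cases hcmp : a.getD ((lo + hi) / 2) 0 < x
      · simp only [hcmp, if_pos]
        refine ih _ _ (by omega) (by omega) hhi ?_ hR
        intro k hk hklt
        rcases Nat.lt_trichotomy k ((lo + hi) / 2) with h' | h' | h'
        · exact lt_of_le_of_lt (hs k _ h' hmid) (hget ▸ hcmp)
        · subst h'; exact hget ▸ hcmp
        · omega
      · simp only [hcmp, if_neg, not_false_iff]
        refine ih _ _ (by omega) (by omega) (by omega) hL ?_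
        intro k hk hge
        have hx : x ≤ a[(lo + hi) / 2] := by rw [← hget]; omega
        rcases Nat.eq_or_lt_of_le hge with h' | h'
        · exact h' ▸ hx
        · exact le_trans hx (hs _ k h' hk)
    · simp only [h, if_neg, not_false_iff]
      exact ⟨by omega, fun k hk hklt => hL k hk (by omega), fun k hk hge => hR k hk (by omega)⟩

-- a list whose first r elements satisfy p and whose rest refute it has countP p = r
lemma countP_of_split (a : List Int) (p : Int → Bool) (r : Nat) (hr : r ≤ a.length)
    (h1 : ∀ k (hk : k < a.length), k < r → p a[k])
    (h2 : ∀ k (hk : k < a.length), r ≤ k → ¬ p a[k]) :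
    a.countP p = r := by
  induction a generalizing r with
  | nil => simp_all
  | cons y t ihg =>
    cases r with
    | zero =>
      have hy : ¬ p y := h2 0 (by simp) (Nat.zero_le _)
      have ht : t.countP p = 0 := ihg 0 (Nat.zero_le _) (fun k hk h => by omega)
        (fun k hk _ => by simpa using h2 (k + 1) (by simp; omega) (by omega))
      simp [hy, ht]
    | succ r =>
      have hy : p y := h1 0 (by simp) (by omega)
      have ht : t.countP p = r := ihg r (by simp at hr; omega)
        (fun k hk h => by simpa using h1 (k + 1) (by simp; omega) (by omega))
        (fun k hk h => by simpa using h2 (k + 1) (by simp; omega) (by omega))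
      simp [hy, ht]

-- bisect_left on the sorted list counts the elements < x of the original list
lemma bl_sorted (list : List Int) (x : Int) :
    bl (PySem.List.sorted list (fun y => y)) x 0 (PySem.List.sorted list (fun y => y)).length
      = list.countP (fun j => decide (j < x)) := by
  set a := PySem.List.sorted list (fun y => y) with ha
  have hp : a.Pairwise (fun u v => u ≤ v) := by
    simpa using PySem.List.sorted_pairwise list (fun y => y)
  have hs : ∀ p q : Nat, ∀ _ : p < q, ∀ hq : q < a.length, a[p]'(by omega) ≤ a[q] := by
    intro p q hpq hq
    exact (List.pairwise_iff_getElem.mp hp) p q (by omega) hq hpq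
  rw [bl]
  obtain ⟨hle, h1, h2⟩ := blF_inv a x hs (a.length - 0) 0 a.length le_rfl (Nat.zero_le _) le_rfl
    (fun k hk h => by omega) (fun k hk h => by omega)
  have := countP_of_split a (fun j => decide (j < x)) (blF a x (a.length - 0) 0 a.length) hle
    (fun k hk h => by simpa using h1 k hk h)
    (fun k hk h => by simpa using h2 k hk h)
  rw [← this]
  exact ((PySem.List.sorted_perm list (fun y => y) false).countP_eq _).symm ▸ rfl

-- A's inner loop counts the elements ≥ i
lemma countGe_foldl (i c : Int) (l : List Int) :
    l.foldl (fun s j => if j ≥ i then s + 1 else s) c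
      = c + (l.countP (fun j => decide (i ≤ j)) : Int) := by
  induction l generalizing c with
  | nil => simp
  | cons y t ih =>
    simp only [List.foldl_cons, List.countP_cons, ih]
    by_cases h : i ≤ y <;> simp [h, ge_iff_le] <;> omega

lemma countP_split (i : Int) (l : List Int) :
    l.countP (fun j => decide (j < i)) + l.countP (fun j => decide (i ≤ j)) = l.length := by
  induction l with
  | nil => simp
  | cons y t ih =>
    by_cases h : y < i
    · simp [h, not_le.mpr h]; omega
    · simp [h, not_lt.mp h]; omega

-- per-element agreement: n - bisect = A's count
lemma cnt_eq (list : List Int) (i : Int) :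
    ((PySem.List.sorted list (fun y => y)).length : Int)
      - (bl (PySem.List.sorted list (fun y => y)) i 0 (PySem.List.sorted list (fun y => y)).length : Int)
      = countGe list i := by
  rw [bl_sorted list i]
  have hlen : (PySem.List.sorted list (fun y => y)).length = list.length :=
    (PySem.List.sorted_perm list (fun y => y) false).length_eq
  have hsplit := countP_split i list
  have hc : countGe list i = (list.countP (fun j => decide (i ≤ j)) : Int) := by
    simpa using countGe_foldl i 0 list
  rw [hc, hlen]
  omega

lemma aux_eq (orig : List Int) :
    ∀ l, findAux orig l
      = findAltAux (PySem.List.sorted orig (fun y => y)) (PySem.List.sorted orig (fun y => y)).length l := by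
  intro l
  induction l with
  | nil => rfl
  | cons i rest ih =>
    simp only [findAux, findAltAux, ← cnt_eq orig i, ih]

-- ===== VERDICT (by name: the statement is the Claim_ definition above) =====
theorem find_spec : Claim_equal_find := by
  intro list _
  unfold Spec_find find find_alt
  exact aux_eq list list
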